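-- pv_equiv track=rewrite | github.com/TheAakashSingh/automationmailsender | email_extractor.py | extract_first_email
-- ===== SOURCE A (Python) =====
-- from typing import List, Set
--
-- def extract_first_email(emails: List[str]) -> str:
--     """
--     Get the first business email from the list.
--     Prefers common business email prefixes.
--     """
--     if not emails:
--         return ""
--
--     # Prefer common business email prefixes
--     preferred_prefixes = ['info@', 'sales@', 'contact@', 'support@', 'hello@', 'help@']
--
--     for prefix in preferred_prefixes:
--         for email in emails:
--             if email.lower().startswith(prefix):
--                 return email
--
--     # Return first email if no preferred found
--     return emails[0]
-- ===== SOURCE B (Python) =====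
-- from typing import List
--
-- _PREFERRED = ['info@', 'sales@', 'contact@', 'support@', 'hello@', 'help@']
--
--
-- def extract_first_email(emails: List[str]) -> str:
--     """
--     Get the first business email from the list.
--     Prefers common business email prefixes.
--
--     One pass: rank each email by a dict lookup on its lowercased
--     local part (up to and including the first '@'), keep the
--     first email with the best (lowest) rank.
--     """
--     if not emails:
--         return ""
--     rank_of = {p: i for i, p in enumerate(_PREFERRED)}
--     sentinel = len(_PREFERRED)
--     best, best_rank = emails[0], sentinel
--     for email in emails:
--         low = email.lower()
--         at = low.find('@')
--         rank = rank_of.get(low[:at + 1], sentinel) if at != -1 else sentinel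
--         if rank < best_rank:
--             best, best_rank = email, rank
--     return best
-- ===== Notes on version B (the rewrite author's own statement) =====
-- stated objective: faster
-- what changed: A scans the email list once per preferred prefix (up to 6 passes, re-lowercasing every email each pass) with an early return; B makes ONE pass over the emails, ranking each email by a single dict lookup on its lowercased local part (the slice up to and including the first '@') and keeping the first email with the lowest rank.
import Mathlib
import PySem

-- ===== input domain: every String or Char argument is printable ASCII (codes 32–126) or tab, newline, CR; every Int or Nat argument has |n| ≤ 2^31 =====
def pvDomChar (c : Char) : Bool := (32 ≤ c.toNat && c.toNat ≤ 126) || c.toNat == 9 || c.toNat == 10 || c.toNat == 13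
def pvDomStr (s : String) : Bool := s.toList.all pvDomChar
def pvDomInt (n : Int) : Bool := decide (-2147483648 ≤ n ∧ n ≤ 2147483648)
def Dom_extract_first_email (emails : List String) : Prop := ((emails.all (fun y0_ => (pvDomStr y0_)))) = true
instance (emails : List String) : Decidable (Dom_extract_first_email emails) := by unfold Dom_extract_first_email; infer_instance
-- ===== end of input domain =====

-- B replaces A's prefixes-outer/emails-inner early-return search by a single pass over the
-- emails keeping the best-ranked one, ranking each email by ONE dict lookup on its lowercased
-- local part (up to and including the first '@'); objective: faster (one .lower() per email,
-- no repeated scans of the list).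

-- ===== PORT A =====
-- inner 'for email in emails: if …: return email' loop = List.find?; outer prefix loop:
def pvFindPreferred (emails : List String) : List String → Option String
  | [] => none
  | p :: ps =>
    match emails.find? (fun e => PySem.Str.startswith (PySem.Str.lower e) p) with
    | some e => some e
    | none => pvFindPreferred emails ps

def extract_first_email (emails : List String) : String :=
  match emails with
  | [] => ""
  | e0 :: _ =>
    match pvFindPreferred emails ["info@", "sales@", "contact@", "support@", "hello@", "help@"] with
    | some e => e
    | none => e0   -- 'return emails[0]' (list known non-empty here)

-- ===== PORT B =====
def pvPreferred : List String := ["info@", "sales@", "contact@", "support@", "hello@", "help@"]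

-- rank_of = {p: i for i, p in enumerate(_PREFERRED)} (enumerate ported via zipIdx)
def pvRankDict : PySem.Dict String Nat :=
  (List.zipIdx pvPreferred).foldl (fun d pi => d.insert pi.1 pi.2) PySem.Dict.empty

-- rank = rank_of.get(low[:at+1], sentinel) if at != -1 else sentinel
def pvRankOf (email : String) : Nat :=
  let low := PySem.Str.lower email
  let at_ := PySem.Str.find low "@"
  if at_ ≠ -1 then
    PySem.Dict.getD pvRankDict (PySem.Str.slice low none (some (at_ + 1))) pvPreferred.length
  else pvPreferred.length

def extract_first_email_alt (emails : List String) : String :=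
  match emails with
  | [] => ""
  | e0 :: _ =>
    (emails.foldl
      (fun acc email =>
        let r := pvRankOf email
        if r < acc.2 then (email, r) else acc)
      (e0, pvPreferred.length)).1

-- ===== PRECONDITION & SPEC =====
def Spec_extract_first_email (emails : List String) (out : String) : Prop := out = extract_first_email_alt emails
instance (emails : List String) (out : String) : Decidable (Spec_extract_first_email emails out) := by unfold Spec_extract_first_email; infer_instance

-- ===== CLAIM (what is proved, stated in full; the proofs are below) =====
def Claim_equal_extract_first_email : Prop := ∀ (emails : List String), Dom_extract_first_email emails → Spec_extract_first_email emails (extract_first_email emails)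

-- ===== LEMMAS AND PROOFS =====

-- the rank dictionary, as a literal
theorem pvRankDict_eq : pvRankDict = PySem.Dict.mk
    [("info@", 0), ("sales@", 1), ("contact@", 2), ("support@", 3), ("hello@", 4), ("help@", 5)] := by
  decide

theorem pvGetD_cases (s : String) : PySem.Dict.getD pvRankDict s 6 =
    if s = "info@" then 0 else if s = "sales@" then 1 else if s = "contact@" then 2
    else if s = "support@" then 3 else if s = "hello@" then 4 else if s = "help@" then 5 else 6 := by
  rcases eq_or_ne s "info@" with rfl | h1
  · decide
  rcases eq_or_ne s "sales@" with rfl | h2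
  · decide
  rcases eq_or_ne s "contact@" with rfl | h3
  · decide
  rcases eq_or_ne s "support@" with rfl | h4
  · decide
  rcases eq_or_ne s "hello@" with rfl | h5
  · decide
  rcases eq_or_ne s "help@" with rfl | h6
  · decide
  simp [pvRankDict_eq, PySem.Dict.getD, PySem.Dict.get?,
    Ne.symm h1, Ne.symm h2, Ne.symm h3, Ne.symm h4, Ne.symm h5, Ne.symm h6, h1, h2, h3, h4, h5, h6]

-- first-occurrence decomposition at '@'
theorem pvDecomp {cs : List Char} (h : '@' ∈ cs) :
    ∃ w t, cs = w ++ '@' :: t ∧ '@' ∉ w := by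
  induction cs with
  | nil => cases h
  | cons c cs ih =>
    by_cases hc : c = '@'
    · exact ⟨[], cs, by simp [hc], by simp⟩
    · have : '@' ∈ cs := by
        rcases List.mem_cons.mp h with h' | h'
        · exact absurd (Eq.symm h') hc
        · exact h'
      obtain ⟨w, t, hwt, hw⟩ := ih this
      refine ⟨c :: w, t, by simp [hwt], ?_⟩
      intro hmem
      rcases List.mem_cons.mp hmem with h' | h'
      · exact hc (Eq.symm h')
      · exact hw h'

-- value of s.find('@') on the decomposition
theorem pvFindGo (w t : List Char) (k : Nat) (hw : '@' ∉ w) :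
    PySem.Chars.find.go ['@'] (w ++ '@' :: t) k = (k + w.length : Int) := by
  induction w generalizing k with
  | nil => simp [PySem.Chars.find.go, List.isPrefixOf]
  | cons a w ih =>
    have ha : a ≠ '@' := fun h => hw (h ▸ List.mem_cons_self)
    have hw' : '@' ∉ w := fun h => hw (List.mem_cons_of_mem _ h)
    rw [List.cons_append]
    simp only [PySem.Chars.find.go, List.isPrefixOf]
    rw [ih _ hw']
    have hfa : ('@' == a) = false := by simp [Ne.symm ha]
    simp only [hfa, Bool.false_and, if_neg Bool.false_ne_true, List.length_cons]
    push_cast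
    ring

-- prefix test against a '@'-terminated pattern is equality of the stems
theorem pvPrefixIff (u : List Char) (hu : '@' ∉ u) :
    ∀ (w : List Char) (t : List Char), '@' ∉ w →
      ((u ++ ['@']).isPrefixOf (w ++ '@' :: t) = true ↔ u = w) := by
  induction u with
  | nil =>
    intro w t hw
    cases w with
    | nil => simp [List.isPrefixOf]
    | cons a w =>
      have ha : a ≠ '@' := fun h => hw (h ▸ List.mem_cons_self)
      simp [List.isPrefixOf, Ne.symm ha]
  | cons b u ih =>
    intro w t hw
    have hb : b ≠ '@' := fun h => hu (h ▸ List.mem_cons_self)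
    have hu' : '@' ∉ u := fun h => hu (List.mem_cons_of_mem _ h)
    cases w with
    | nil => simp [List.isPrefixOf, hb]
    | cons a w =>
      have hw' : '@' ∉ w := fun h => hw (List.mem_cons_of_mem _ h)
      have := ih hu' w t hw'
      simp only [List.cons_append, List.isPrefixOf, Bool.and_eq_true, beq_iff_eq]
      constructor
      · rintro ⟨rfl, h2⟩
        rw [(this).mp h2]
      · intro heq
        rw [List.cons.injEq] at heq
        exact ⟨heq.1, (this).mpr heq.2⟩

-- pvRankOf through the decomposition
theorem pvRankOf_decomp (email : String) (w t : List Char)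
    (hwt : (PySem.Str.lower email).toList = w ++ '@' :: t) (hw : '@' ∉ w) :
    pvRankOf email = PySem.Dict.getD pvRankDict (String.ofList (w ++ ['@'])) 6 := by
  have hfind : PySem.Str.find (PySem.Str.lower email) "@" = (w.length : Int) := by
    simp only [PySem.Str.find, PySem.Chars.find, hwt]
    have h0 : ("@" : String).toList = ['@'] := rfl
    rw [h0, pvFindGo _ _ _ hw]
    push_cast; ring
  have hslice : PySem.Str.slice (PySem.Str.lower email) none (some ((w.length : Int) + 1))
      = String.ofList (w ++ ['@']) := by
    simp only [PySem.Str.slice, PySem.Chars.slice, hwt]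
    have hcast : ((w.length : Int) + 1) = ((w.length + 1 : Nat) : Int) := by push_cast; ring
    rw [hcast, PySem.List.slice_to_natCast, List.take_length_add_append]
    rfl
  unfold pvRankOf
  simp only [hfind]
  rw [if_pos (by omega)]
  rw [hslice]
  rfl

theorem pvRankOf_noAt (email : String) (h : '@' ∉ (PySem.Str.lower email).toList) :
    pvRankOf email = 6 := by
  have hfind : PySem.Str.find (PySem.Str.lower email) "@" = -1 := by
    rw [PySem.Str.find_eq_neg_one_iff]
    have h0 : ("@" : String).toList = ['@'] := rfl
    rw [h0, List.singleton_infix_iff]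
    exact h
  unfold pvRankOf
  simp only [hfind]
  rw [if_neg (by omega)]
  rfl

-- core per-email lemma: startswith against prefix number j tests rank = j
theorem pvMatchCore (e : String) (u : List Char) (j : Nat) (hu : '@' ∉ u) (hj : j < 6)
    (hiff : ∀ s : String, PySem.Dict.getD pvRankDict s 6 = j ↔ s = String.ofList (u ++ ['@'])) :
    PySem.Str.startswith (PySem.Str.lower e) (String.ofList (u ++ ['@'])) = (pvRankOf e == j) := by
  simp only [PySem.Str.startswith, PySem.Chars.startswith]
  have htl : (String.ofList (u ++ ['@'])).toList = u ++ ['@'] := by simp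
  rw [htl]
  by_cases hm : '@' ∈ (PySem.Str.lower e).toList
  · obtain ⟨w, t, hwt, hw⟩ := pvDecomp hm
    rw [hwt]
    have hr := pvRankOf_decomp e w t hwt hw
    by_cases huw : u = w
    · subst huw
      have h1 : (u ++ ['@']).isPrefixOf (u ++ '@' :: t) = true := (pvPrefixIff u hu u t hw).mpr rfl
      have h2 : pvRankOf e = j := by rw [hr]; exact (hiff _).mpr rfl
      simp [h1, h2]
    · have h1 : (u ++ ['@']).isPrefixOf (w ++ '@' :: t) = false := by
        cases hpre : (u ++ ['@']).isPrefixOf (w ++ '@' :: t) with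
        | true => exact absurd ((pvPrefixIff u hu w t hw).mp hpre) huw
        | false => rfl
      have h2 : pvRankOf e ≠ j := by
        rw [hr]
        intro hj'
        have hofl := (hiff _).mp hj'
        have : w ++ ['@'] = u ++ ['@'] := String.ofList_inj.mp hofl
        exact huw (List.append_cancel_right this).symm
      simp [h1, h2]
  · have h1 : (u ++ ['@']).isPrefixOf ((PySem.Str.lower e).toList) = false := by
      cases hpre : (u ++ ['@']).isPrefixOf ((PySem.Str.lower e).toList) with
      | true =>
        have hpref := List.isPrefixOf_iff_prefix.mp hpre
        exact absurd (hpref.subset (by simp)) hm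
      | false => rfl
    have h2 : pvRankOf e = 6 := pvRankOf_noAt e hm
    have h3 : (6 : Nat) ≠ j := by omega
    rw [h1, h2]
    simp [h3]

theorem pvMatch0 (e : String) : PySem.Str.startswith (PySem.Str.lower e) "info@" = (pvRankOf e == 0) := by
  have hx : ("info@" : String) = String.ofList (['i','n','f','o'] ++ ['@']) := by decide
  rw [hx]
  refine pvMatchCore e _ 0 (by decide) (by decide) (fun s => ?_)
  rw [pvGetD_cases, ← hx]
  split_ifs <;> simp_all
theorem pvMatch1 (e : String) : PySem.Str.startswith (PySem.Str.lower e) "sales@" = (pvRankOf e == 1) := by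
  have hx : ("sales@" : String) = String.ofList (['s','a','l','e','s'] ++ ['@']) := by decide
  rw [hx]
  refine pvMatchCore e _ 1 (by decide) (by decide) (fun s => ?_)
  rw [pvGetD_cases, ← hx]
  split_ifs <;> simp_all
theorem pvMatch2 (e : String) : PySem.Str.startswith (PySem.Str.lower e) "contact@" = (pvRankOf e == 2) := by
  have hx : ("contact@" : String) = String.ofList (['c','o','n','t','a','c','t'] ++ ['@']) := by decide
  rw [hx]
  refine pvMatchCore e _ 2 (by decide) (by decide) (fun s => ?_)
  rw [pvGetD_cases, ← hx]
  split_ifs <;> simp_all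
theorem pvMatch3 (e : String) : PySem.Str.startswith (PySem.Str.lower e) "support@" = (pvRankOf e == 3) := by
  have hx : ("support@" : String) = String.ofList (['s','u','p','p','o','r','t'] ++ ['@']) := by decide
  rw [hx]
  refine pvMatchCore e _ 3 (by decide) (by decide) (fun s => ?_)
  rw [pvGetD_cases, ← hx]
  split_ifs <;> simp_all
theorem pvMatch4 (e : String) : PySem.Str.startswith (PySem.Str.lower e) "hello@" = (pvRankOf e == 4) := by
  have hx : ("hello@" : String) = String.ofList (['h','e','l','l','o'] ++ ['@']) := by decide
  rw [hx]
  refine pvMatchCore e _ 4 (by decide) (by decide) (fun s => ?_)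
  rw [pvGetD_cases, ← hx]
  split_ifs <;> simp_all
theorem pvMatch5 (e : String) : PySem.Str.startswith (PySem.Str.lower e) "help@" = (pvRankOf e == 5) := by
  have hx : ("help@" : String) = String.ofList (['h','e','l','p'] ++ ['@']) := by decide
  rw [hx]
  refine pvMatchCore e _ 5 (by decide) (by decide) (fun s => ?_)
  rw [pvGetD_cases, ← hx]
  split_ifs <;> simp_all

-- numeric mirror of A's prefix loop (fuel + j = 6)
def pvGFind (emails : List String) : Nat → Nat → Option String
  | 0, _ => none
  | fuel + 1, j =>
    match emails.find? (fun e => pvRankOf e == j) with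
    | some e => some e
    | none => pvGFind emails fuel (j + 1)

theorem pvBridge (emails : List String) :
    pvFindPreferred emails ["info@", "sales@", "contact@", "support@", "hello@", "help@"]
      = pvGFind emails 6 0 := by
  simp only [pvFindPreferred, pvGFind, pvMatch0, pvMatch1, pvMatch2, pvMatch3, pvMatch4, pvMatch5]

-- running minimum of ranks
def pvMin (l : List String) (rb : Nat) : Nat := l.foldl (fun a e => min a (pvRankOf e)) rb

theorem pvMin_le_init (l : List String) (rb : Nat) : pvMin l rb ≤ rb := by
  induction l generalizing rb with
  | nil => exact le_refl rb
  | cons e l ih => exact le_trans (ih _) (Nat.min_le_left _ _)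

theorem pvMin_le_mem (l : List String) (rb : Nat) {e : String} (he : e ∈ l) :
    pvMin l rb ≤ pvRankOf e := by
  induction l generalizing rb with
  | nil => cases he
  | cons e' l ih =>
    rcases List.mem_cons.mp he with rfl | he'
    · exact le_trans (pvMin_le_init l _) (Nat.min_le_right _ _)
    · exact ih _ he'

theorem le_pvMin (l : List String) (rb a : Nat) (h0 : a ≤ rb) (h : ∀ e ∈ l, a ≤ pvRankOf e) :
    a ≤ pvMin l rb := by
  induction l generalizing rb with
  | nil => exact h0
  | cons e l ih =>
    exact ih _ (le_min h0 (h e List.mem_cons_self)) (fun e' he' => h e' (List.mem_cons_of_mem _ he'))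

theorem pvMin_attained (l : List String) (rb : Nat) :
    pvMin l rb = rb ∨ ∃ e ∈ l, pvRankOf e = pvMin l rb := by
  induction l generalizing rb with
  | nil => exact Or.inl rfl
  | cons e l ih =>
    have hrfl : pvMin (e :: l) rb = pvMin l (min rb (pvRankOf e)) := rfl
    rcases ih (min rb (pvRankOf e)) with h | ⟨e', he', hr⟩
    · rcases Nat.le_total rb (pvRankOf e) with hle | hle
      · exact Or.inl (by rw [hrfl, h, Nat.min_eq_left hle])
      · exact Or.inr ⟨e, List.mem_cons_self, by rw [hrfl, h, Nat.min_eq_right hle]⟩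
    · exact Or.inr ⟨e', List.mem_cons_of_mem _ he', by rw [hrfl]; exact hr⟩

-- characterization of A's prefix loop
theorem pvGFind_char (emails : List String) :
    ∀ fuel j, fuel + j = 6 → (∀ e ∈ emails, j ≤ pvRankOf e) →
      pvGFind emails fuel j =
        if pvMin emails 6 = 6 then none
        else emails.find? (fun e => pvRankOf e == pvMin emails 6) := by
  intro fuel
  induction fuel with
  | zero =>
    intro j hj hlow
    have hj6 : j = 6 := by omega
    subst hj6
    have h1 : (6 : Nat) ≤ pvMin emails 6 := le_pvMin emails 6 6 (le_refl _) hlow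
    have h2 : pvMin emails 6 ≤ 6 := pvMin_le_init emails 6
    rw [if_pos (by omega)]
    rfl
  | succ fuel ih =>
    intro j hj hlow
    have hjlt : j < 6 := by omega
    show (match emails.find? (fun e => pvRankOf e == j) with
          | some e => some e
          | none => pvGFind emails fuel (j + 1)) = _
    cases hfq : emails.find? (fun e => pvRankOf e == j) with
    | some e =>
      have hmem : e ∈ emails := List.mem_of_find?_eq_some hfq
      have hre : pvRankOf e = j := by
        have := List.find?_some hfq
        simpa using this
      have hm1 : pvMin emails 6 ≤ j := hre ▸ pvMin_le_mem emails 6 hmem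
      have hm2 : j ≤ pvMin emails 6 := le_pvMin emails 6 j (by omega) hlow
      have hmj : pvMin emails 6 = j := le_antisymm hm1 hm2
      rw [if_neg (by omega), hmj, hfq]
    | none =>
      have hnone := List.find?_eq_none.mp hfq
      have hlow' : ∀ e ∈ emails, j + 1 ≤ pvRankOf e := by
        intro e he
        have h1 := hlow e he
        have h2 : ¬(pvRankOf e == j) = true := hnone e he
        simp only [beq_iff_eq] at h2
        omega
      exact ih (j + 1) (by omega) hlow'

-- characterization of B's fold
theorem pvFold_char (l : List String) :
    ∀ (b : String) (rb : Nat),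
      l.foldl (fun acc email => let r := pvRankOf email; if r < acc.2 then (email, r) else acc) (b, rb)
        = ((if pvMin l rb < rb then (l.find? (fun e => pvRankOf e == pvMin l rb)).getD b else b),
           pvMin l rb) := by
  induction l with
  | nil =>
    intro b rb
    simp [pvMin]
  | cons e l ih =>
    intro b rb
    show (l.foldl _ (if pvRankOf e < rb then (e, pvRankOf e) else (b, rb))) = _
    by_cases hcmp : pvRankOf e < rb
    · rw [if_pos hcmp]
      rw [ih e (pvRankOf e)]
      have hmin : pvMin (e :: l) rb = pvMin l (pvRankOf e) := by
        show pvMin l (min rb (pvRankOf e)) = _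
        rw [Nat.min_eq_right (le_of_lt hcmp)]
      rw [hmin]
      have hle : pvMin l (pvRankOf e) ≤ pvRankOf e := pvMin_le_init l _
      rcases Nat.lt_or_ge (pvMin l (pvRankOf e)) (pvRankOf e) with hlt | hge
      · -- a strictly better element occurs in l
        have hne : pvRankOf e ≠ pvMin l (pvRankOf e) := by omega
        have hfind : (e :: l).find? (fun x => pvRankOf x == pvMin l (pvRankOf e))
            = l.find? (fun x => pvRankOf x == pvMin l (pvRankOf e)) := by
          rw [List.find?_cons_of_neg]
          simp [hne]
        rw [if_pos hlt, if_pos (by omega), hfind]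
        rcases pvMin_attained l (pvRankOf e) with hatt | ⟨e', he', hr'⟩
        · omega
        · cases hfq : l.find? (fun x => pvRankOf x == pvMin l (pvRankOf e)) with
          | some x => rfl
          | none =>
            have := List.find?_eq_none.mp hfq e' he'
            simp [hr'] at this
      · have heq : pvMin l (pvRankOf e) = pvRankOf e := le_antisymm hle hge
        have hfind : (e :: l).find? (fun x => pvRankOf x == pvMin l (pvRankOf e)) = some e := by
          rw [List.find?_cons_of_pos]
          simp [heq]
        rw [if_neg (by omega), if_pos (by omega), hfind]
        rfl
    · rw [if_neg hcmp]
      rw [ih b rb]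
      have hge : rb ≤ pvRankOf e := by omega
      have hmin : pvMin (e :: l) rb = pvMin l rb := by
        show pvMin l (min rb (pvRankOf e)) = _
        rw [Nat.min_eq_left hge]
      rw [hmin]
      by_cases hlt : pvMin l rb < rb
      · have hne : pvRankOf e ≠ pvMin l rb := by omega
        have hfind : (e :: l).find? (fun x => pvRankOf x == pvMin l rb)
            = l.find? (fun x => pvRankOf x == pvMin l rb) := by
          rw [List.find?_cons_of_neg]
          simp [hne]
        rw [if_pos hlt, if_pos hlt, hfind]
      · rw [if_neg hlt, if_neg hlt]

-- ===== VERDICT (by name: the statement is the Claim_ definition above) =====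
theorem extract_first_email_spec : Claim_equal_extract_first_email := by
  intro emails _
  unfold Spec_extract_first_email
  cases emails with
  | nil => rfl
  | cons e0 rest =>
    have hlen : pvPreferred.length = 6 := rfl
    show (match pvFindPreferred (e0 :: rest) ["info@", "sales@", "contact@", "support@", "hello@", "help@"] with
          | some e => e
          | none => e0)
        = ((e0 :: rest).foldl
            (fun acc email => let r := pvRankOf email; if r < acc.2 then (email, r) else acc)
            (e0, pvPreferred.length)).1
    rw [hlen, pvBridge, pvFold_char,
      pvGFind_char (e0 :: rest) 6 0 rfl (fun e _ => Nat.zero_le _)]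
    by_cases hm : pvMin (e0 :: rest) 6 = 6
    · rw [if_pos hm, if_neg (by omega)]
    · have hlt : pvMin (e0 :: rest) 6 < 6 :=
        lt_of_le_of_ne (pvMin_le_init _ _) hm
      rw [if_neg hm, if_pos hlt]
      rcases pvMin_attained (e0 :: rest) 6 with hatt | ⟨e', he', hr'⟩
      · omega
      · cases hfq : (e0 :: rest).find? (fun e => pvRankOf e == pvMin (e0 :: rest) 6) with
        | some x => rfl
        | none =>
          have := List.find?_eq_none.mp hfq e' he'
          simp [hr'] at this
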